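-- pv_equiv track=rewrite | github.com/MANZHAOHUI/PD-Proteomics-Analysis | scripts/python/PD_network_analysis.py | _construct_module_hierarchy
-- ===== SOURCE A (Python) =====
-- def _construct_module_hierarchy(modules):
--     """
--     Construct hierarchical relationships between modules
--     """
--     hierarchy = {}
--
--     # Calculate overlap between modules
--     for m1 in modules:
--         for m2 in modules:
--             if m1 != m2:
--                 overlap = len(set(modules[m1]) & set(modules[m2]))
--                 if overlap > 0:
--                     if m1 not in hierarchy:
--                         hierarchy[m1] = {}
--                     hierarchy[m1][m2] = overlap
--
--     return hierarchy
-- ===== SOURCE B (Python) =====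
-- def _construct_module_hierarchy(modules):
--     """
--     Construct hierarchical relationships between modules
--     (inverted index element -> modules, so overlaps are counted without
--     per-pair set intersections)
--     """
--     # inverted index: element -> modules containing it (first-occurrence dedup)
--     index = {}
--     for name in modules:
--         for e in dict.fromkeys(modules[name]):
--             index.setdefault(e, []).append(name)
--
--     hierarchy = {}
--     for m1 in modules:
--         # counts[m2] = number of distinct shared elements of m1 and m2
--         counts = {}
--         for e in dict.fromkeys(modules[m1]):
--             for m2 in index[e]:
--                 counts[m2] = counts.get(m2, 0) + 1
--         inner = {m2: counts[m2] for m2 in modules if m2 != m1 and m2 in counts}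
--         if inner:
--             hierarchy[m1] = inner
--     return hierarchy
-- ===== Notes on version B (the rewrite author's own statement) =====
-- stated objective: faster
-- what changed: Replaces the all-pairs loop that builds and intersects two sets per module pair with an inverted index element->modules built once; each module's overlap counts are then accumulated by walking only the index lists of its own elements, so no per-pair set intersection is ever computed.
import Mathlib
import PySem

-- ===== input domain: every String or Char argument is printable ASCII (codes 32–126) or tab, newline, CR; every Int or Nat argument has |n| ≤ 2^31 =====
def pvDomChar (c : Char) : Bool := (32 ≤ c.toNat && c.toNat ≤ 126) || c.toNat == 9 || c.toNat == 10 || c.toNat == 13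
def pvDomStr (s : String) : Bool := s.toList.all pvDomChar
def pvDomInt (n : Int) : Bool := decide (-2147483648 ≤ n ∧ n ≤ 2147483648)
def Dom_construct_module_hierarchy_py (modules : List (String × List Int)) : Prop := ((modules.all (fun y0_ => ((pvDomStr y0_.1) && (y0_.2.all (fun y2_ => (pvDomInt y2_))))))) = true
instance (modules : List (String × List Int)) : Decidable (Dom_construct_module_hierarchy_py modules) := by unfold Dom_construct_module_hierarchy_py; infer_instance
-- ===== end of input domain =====

-- ===== PORT A =====
-- B replaces the all-pairs set-intersection loop by an inverted index element->modules; faster.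
-- modules is a Python dict name -> member list (assoc list here); modules[m1] with m1 a key
-- always succeeds, so Dict.getD is exact; hierarchy[m1] is read only after it was created.
def construct_module_hierarchy_py (modules : List (String × List Int)) : List (String × List (String × Int)) :=
  let md := PySem.Dict.mk modules
  let hierarchy : PySem.Dict String (PySem.Dict String Int) :=
    md.keys.foldl (fun h m1 =>
      md.keys.foldl (fun h m2 =>
        if m1 ≠ m2 then
          let overlap : Int :=
            ((PySem.Set.inter (PySem.Set.ofList (md.getD m1 []))
                (PySem.Set.ofList (md.getD m2 []))).length : Int)
          if overlap > 0 then
            let h1 := if h.contains m1 then h else h.insert m1 PySem.Dict.empty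
            h1.insert m1 ((h1.getD m1 PySem.Dict.empty).insert m2 overlap)
          else h
        else h) h) PySem.Dict.empty
  hierarchy.items.map (fun p => (p.1, p.2.items))

-- ===== PORT B =====
-- index.setdefault(e, []).append(name) is Dict.modify e [] (· ++ [name]); dict.fromkeys is
-- PySem.List.dedup; index[e] always has its key (e comes from modules[m1], which was indexed),
-- so Dict.getD is exact; both result dicts are built by appending fresh keys, hence plain lists.
def construct_module_hierarchy_py_alt (modules : List (String × List Int)) : List (String × List (String × Int)) :=
  let md := PySem.Dict.mk modules
  let index : PySem.Dict Int (List String) :=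
    md.keys.foldl (fun idx name =>
      (PySem.List.dedup (md.getD name [])).foldl (fun idx e =>
        idx.modify e [] (· ++ [name])) idx) PySem.Dict.empty
  md.keys.foldl (fun out m1 =>
    let counts : PySem.Dict String Int :=
      (PySem.List.dedup (md.getD m1 [])).foldl (fun c e =>
        (index.getD e []).foldl (fun c m2 => c.insert m2 (c.getD m2 0 + 1)) c) PySem.Dict.empty
    let inner : List (String × Int) :=
      md.keys.foldl (fun inner m2 =>
        if m2 != m1 && counts.contains m2 then inner ++ [(m2, counts.getD m2 0)] else inner) []
    if !inner.isEmpty then out ++ [(m1, inner)] else out) []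

-- ===== PRECONDITION & SPEC =====
-- Pre_ restricts to distinct module names: the Python argument is a dict, whose keys are
-- necessarily distinct, so an assoc list with duplicate keys represents no Python input at all.
def Pre_construct_module_hierarchy_py (modules : List (String × List Int)) : Prop :=
  (modules.map Prod.fst).Nodup
instance (modules : List (String × List Int)) : Decidable (Pre_construct_module_hierarchy_py modules) := by unfold Pre_construct_module_hierarchy_py; infer_instance
def pvWitness_construct_module_hierarchy_py : (List (String × List Int)) :=
  [("a", [1, 2]), ("b", [2, 3]), ("c", [7])]
def Spec_construct_module_hierarchy_py (modules : List (String × List Int)) (out : List (String × List (String × Int))) : Prop := out = construct_module_hierarchy_py_alt modules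
instance (modules : List (String × List Int)) (out : List (String × List (String × Int))) : Decidable (Spec_construct_module_hierarchy_py modules out) := by unfold Spec_construct_module_hierarchy_py; infer_instance

-- ===== CLAIM (what is proved, stated in full; the proofs are below) =====
def Claim_equal_construct_module_hierarchy_py : Prop := ∀ (modules : List (String × List Int)), Dom_construct_module_hierarchy_py modules → Pre_construct_module_hierarchy_py modules → Spec_construct_module_hierarchy_py modules (construct_module_hierarchy_py modules)

-- ===== LEMMAS AND PROOFS =====

-- the common specification both ports are reduced to
def pvOv (md : PySem.Dict String (List Int)) (m1 m2 : String) : Int :=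
  ((PySem.Set.inter (PySem.Set.ofList (md.getD m1 []))
      (PySem.Set.ofList (md.getD m2 []))).length : Int)

def pvInner (md : PySem.Dict String (List Int)) (ks : List String) (m1 : String) : List (String × Int) :=
  (ks.filter (fun m2 => decide (m1 ≠ m2) && decide (0 < pvOv md m1 m2))).map
    (fun m2 => (m2, pvOv md m1 m2))

def pvSpec (md : PySem.Dict String (List Int)) (ks : List String) : List (String × List (String × Int)) :=
  (ks.filter (fun m1 => !(pvInner md ks m1).isEmpty)).map (fun m1 => (m1, pvInner md ks m1))

-- A's inner-loop body, named so the loop lemmas can speak about it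
def pvStepA (md : PySem.Dict String (List Int)) (m1 : String)
    (h : PySem.Dict String (PySem.Dict String Int)) (m2 : String) :
    PySem.Dict String (PySem.Dict String Int) :=
  if m1 ≠ m2 then
    let overlap : Int :=
      ((PySem.Set.inter (PySem.Set.ofList (md.getD m1 []))
          (PySem.Set.ofList (md.getD m2 []))).length : Int)
    if overlap > 0 then
      let h1 := if h.contains m1 then h else h.insert m1 PySem.Dict.empty
      h1.insert m1 ((h1.getD m1 PySem.Dict.empty).insert m2 overlap)
    else h
  else h

lemma pvA_eq_fold (modules : List (String × List Int)) :
    construct_module_hierarchy_py modules =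
      (((PySem.Dict.mk modules).keys.foldl
          (fun h m1 => (PySem.Dict.mk modules).keys.foldl (pvStepA (PySem.Dict.mk modules) m1) h)
          PySem.Dict.empty).items.map (fun p => (p.1, p.2.items))) := rfl

lemma pvInner_cons (md : PySem.Dict String (List Int)) (m1 m2 : String) (l : List String) :
    pvInner md (m2 :: l) m1 =
      (if m1 ≠ m2 ∧ 0 < pvOv md m1 m2 then [(m2, pvOv md m1 m2)] else []) ++ pvInner md l m1 := by
  by_cases h : m1 ≠ m2 ∧ 0 < pvOv md m1 m2
  · simp [pvInner, h.1, h.2]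
  · rw [Decidable.not_and_iff_not_or_not] at h
    rcases h with h | h <;> simp [pvInner, h]

-- inner loop, key m1 already present as the LAST entry: every further hit appends to that entry
lemma pvA2 (md : PySem.Dict String (List Int)) (m1 : String) :
    ∀ (l : List String) (pre : List (String × PySem.Dict String Int)) (cur : List (String × Int)),
      l.Nodup → (∀ p ∈ pre, p.1 ≠ m1) → (pre.map Prod.fst).Nodup →
      (∀ m2 ∈ l, ∀ q ∈ cur, q.1 ≠ m2) →
      l.foldl (pvStepA md m1) (PySem.Dict.mk (pre ++ [(m1, PySem.Dict.mk cur)])) =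
        PySem.Dict.mk (pre ++ [(m1, PySem.Dict.mk (cur ++ pvInner md l m1))]) := by
  intro l
  induction l with
  | nil => intro pre cur _ _ _ _; simp [pvInner]
  | cons m2 l ih =>
    intro pre cur hnd hpre hprend hfresh
    obtain ⟨hm2l, hndl⟩ := List.nodup_cons.mp hnd
    have hkeys : (PySem.Dict.mk (pre ++ [(m1, PySem.Dict.mk cur)])).keys
        = pre.map Prod.fst ++ [m1] := by simp [PySem.Dict.keys]
    have hknd : ((PySem.Dict.mk (pre ++ [(m1, PySem.Dict.mk cur)])).keys).Nodup := by
      rw [hkeys]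
      refine List.Nodup.append hprend (List.nodup_singleton m1) ?_
      intro a ha hb
      simp at hb
      obtain ⟨p, hp, hpa⟩ := List.mem_map.mp ha
      exact hpre p hp (hpa.trans hb)
    have hcont : (PySem.Dict.mk (pre ++ [(m1, PySem.Dict.mk cur)])).contains m1 = true := by
      rw [PySem.Dict.contains_iff_mem_keys, hkeys]; simp
    have hgetD : (PySem.Dict.mk (pre ++ [(m1, PySem.Dict.mk cur)])).getD m1 PySem.Dict.empty
        = PySem.Dict.mk cur := by
      refine PySem.Dict.getD_of_mem_items _ ?_ hknd _
      simp
    by_cases hc : m1 ≠ m2 ∧ 0 < pvOv md m1 m2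
    · have hstep : pvStepA md m1 (PySem.Dict.mk (pre ++ [(m1, PySem.Dict.mk cur)])) m2
          = PySem.Dict.mk (pre ++ [(m1, PySem.Dict.mk (cur ++ [(m2, pvOv md m1 m2)]))]) := by
        have hcurnc : (PySem.Dict.mk cur).contains m2 = false := by
          rw [Bool.eq_false_iff]
          intro hx
          rw [PySem.Dict.contains_iff_mem_keys] at hx
          simp [PySem.Dict.keys] at hx
          obtain ⟨x, hx⟩ := hx
          exact hfresh m2 (List.mem_cons_self) (m2, x) hx rfl
        have hins1 : (PySem.Dict.mk cur).insert m2 (pvOv md m1 m2)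
            = PySem.Dict.mk (cur ++ [(m2, pvOv md m1 m2)]) := by
          apply PySem.Dict.ext
          rw [PySem.Dict.items_insert_of_not_contains _ _ hcurnc]
        have hins2 : (PySem.Dict.mk (pre ++ [(m1, PySem.Dict.mk cur)])).insert m1
              (PySem.Dict.mk (cur ++ [(m2, pvOv md m1 m2)]))
            = PySem.Dict.mk (pre ++ [(m1, PySem.Dict.mk (cur ++ [(m2, pvOv md m1 m2)]))]) := by
          apply PySem.Dict.ext
          rw [PySem.Dict.items_insert_of_contains _ _ hcont]
          show (pre ++ [(m1, PySem.Dict.mk cur)]).map _ = _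
          rw [List.map_append]
          congr 1
          · refine (List.map_congr_left ?_).trans (List.map_id _)
            intro p hp
            simp [beq_eq_false_iff_ne.mpr (hpre p hp)]
          · simp
        simp only [pvStepA, pvOv] at *
        rw [if_pos hc.1, if_pos hc.2]
        simp only [hcont, if_true, hgetD, hins1, hins2]
      rw [List.foldl_cons, hstep,
        ih pre (cur ++ [(m2, pvOv md m1 m2)]) hndl hpre hprend ?_,
        pvInner_cons, if_pos hc, List.append_assoc]
      intro m hm q hq
      rcases List.mem_append.mp hq with hq | hq
      · exact hfresh m (List.mem_cons_of_mem _ hm) q hq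
      · simp at hq
        subst hq
        simp only [ne_eq]
        intro hx; exact hm2l (hx ▸ hm)
    · have hstep : pvStepA md m1 (PySem.Dict.mk (pre ++ [(m1, PySem.Dict.mk cur)])) m2
          = PySem.Dict.mk (pre ++ [(m1, PySem.Dict.mk cur)]) := by
        rw [Decidable.not_and_iff_not_or_not] at hc
        rcases hc with hc | hc
        · simp only [pvStepA]; rw [if_neg hc]
        · simp only [pvStepA]
          split_ifs with h1 h2
          · exact absurd h2 hc
          · rfl
          · rfl
      rw [List.foldl_cons, hstep,
        ih pre cur hndl hpre hprend (fun m hm => hfresh m (List.mem_cons_of_mem _ hm)),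
        pvInner_cons, if_neg hc, List.nil_append]

-- inner loop from a state not containing m1
lemma pvA1 (md : PySem.Dict String (List Int)) (m1 : String) (l : List String)
    (h : PySem.Dict String (PySem.Dict String Int))
    (hl : l.Nodup) (hc : h.contains m1 = false) (hk : h.keys.Nodup) :
    l.foldl (pvStepA md m1) h =
      if (pvInner md l m1).isEmpty then h
      else PySem.Dict.mk (h.items ++ [(m1, PySem.Dict.mk (pvInner md l m1))]) := by
  induction l with
  | nil => simp [pvInner]
  | cons m2 l ih =>
    obtain ⟨hm2l, hndl⟩ := List.nodup_cons.mp hl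
    by_cases hq : m1 ≠ m2 ∧ 0 < pvOv md m1 m2
    · have hstep : pvStepA md m1 h m2
          = PySem.Dict.mk (h.items ++ [(m1, PySem.Dict.mk [(m2, pvOv md m1 m2)])]) := by
        have hins2 : (h.insert m1 PySem.Dict.empty).insert m1
              (PySem.Dict.mk [(m2, pvOv md m1 m2)])
            = PySem.Dict.mk (h.items ++ [(m1, PySem.Dict.mk [(m2, pvOv md m1 m2)])]) := by
          rw [PySem.Dict.insert_insert_self]
          apply PySem.Dict.ext
          rw [PySem.Dict.items_insert_of_not_contains _ _ hc]
        have hget : (h.insert m1 PySem.Dict.empty).getD m1 PySem.Dict.empty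
            = PySem.Dict.empty := by
          rw [PySem.Dict.getD_insert_self]
        have hemp : PySem.Dict.empty.insert m2 (pvOv md m1 m2)
            = PySem.Dict.mk [(m2, pvOv md m1 m2)] := rfl
        simp only [pvStepA, pvOv] at *
        rw [if_pos hq.1, if_pos hq.2]
        simp only [hc, Bool.false_eq_true, if_false, hget, hemp, hins2]
      have hfst : ∀ p ∈ h.items, p.1 ≠ m1 := by
        intro p hp hpe
        have : m1 ∈ h.keys := by
          simp only [PySem.Dict.keys]
          exact List.mem_map.mpr ⟨p, hp, hpe⟩
        rw [← PySem.Dict.contains_iff_mem_keys] at this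
        rw [hc] at this; cases this
      rw [List.foldl_cons, hstep,
        pvA2 md m1 l h.items [(m2, pvOv md m1 m2)] hndl hfst hk ?_,
        pvInner_cons, if_pos hq]
      · simp
      · intro m hm q hq'
        simp at hq'
        subst hq'
        simp only [ne_eq]
        intro hx; exact hm2l (hx ▸ hm)
    · have hstep : pvStepA md m1 h m2 = h := by
        rw [Decidable.not_and_iff_not_or_not] at hq
        rcases hq with hq | hq
        · simp only [pvStepA]; rw [if_neg hq]
        · simp only [pvStepA, pvOv] at *
          split_ifs <;> rfl
      rw [List.foldl_cons, hstep, ih hndl, pvInner_cons, if_neg hq, List.nil_append]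

lemma pvA3 (md : PySem.Dict String (List Int)) (ks : List String) (hks : ks.Nodup) :
    ∀ (l : List String) (h : PySem.Dict String (PySem.Dict String Int)),
      l.Nodup → (∀ m ∈ l, h.contains m = false) → h.keys.Nodup →
      (l.foldl (fun h m1 => ks.foldl (pvStepA md m1) h) h).items =
        h.items ++ (l.filter (fun m1 => !(pvInner md ks m1).isEmpty)).map
          (fun m1 => (m1, PySem.Dict.mk (pvInner md ks m1))) := by
  intro l
  induction l with
  | nil => intro h _ _ _; simp
  | cons m1 l ih =>
    intro h hnd hfr hknd
    obtain ⟨hm1l, hndl⟩ := List.nodup_cons.mp hnd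
    have hc : h.contains m1 = false := hfr m1 List.mem_cons_self
    rw [List.foldl_cons, pvA1 md m1 ks h hks hc hknd]
    by_cases he : (pvInner md ks m1).isEmpty
    · rw [if_pos he, ih h hndl (fun m hm => hfr m (List.mem_cons_of_mem _ hm)) hknd,
        List.filter_cons_of_neg (by simp [he])]
    · rw [if_neg he]
      have hkeys2 : (PySem.Dict.mk (h.items ++ [(m1, PySem.Dict.mk (pvInner md ks m1))])).keys
          = h.keys ++ [m1] := by simp [PySem.Dict.keys]
      have hm1nk : m1 ∉ h.keys := by
        intro hx
        rw [← PySem.Dict.contains_iff_mem_keys] at hx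
        rw [hc] at hx; cases hx
      have hknd2 : (PySem.Dict.mk (h.items ++ [(m1, PySem.Dict.mk (pvInner md ks m1))])).keys.Nodup := by
        rw [hkeys2]
        refine List.Nodup.append hknd (List.nodup_singleton m1) ?_
        intro a ha hb
        simp at hb
        exact hm1nk (hb ▸ ha)
      have hfr2 : ∀ m ∈ l,
          (PySem.Dict.mk (h.items ++ [(m1, PySem.Dict.mk (pvInner md ks m1))])).contains m = false := by
        intro m hm
        rw [Bool.eq_false_iff]
        intro hx
        rw [PySem.Dict.contains_iff_mem_keys, hkeys2] at hx
        rcases List.mem_append.mp hx with hx | hx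
        · have := hfr m (List.mem_cons_of_mem _ hm)
          rw [← PySem.Dict.contains_iff_mem_keys] at hx
          rw [this] at hx; cases hx
        · simp at hx
          exact hm1l (hx ▸ hm)
      rw [ih _ hndl hfr2 hknd2, List.filter_cons_of_pos (by simp [he])]
      simp

lemma pvA_spec (modules : List (String × List Int))
    (hnd : (modules.map Prod.fst).Nodup) :
    construct_module_hierarchy_py modules =
      pvSpec (PySem.Dict.mk modules) (PySem.Dict.mk modules).keys := by
  have hknd : (PySem.Dict.mk modules).keys.Nodup := hnd
  rw [pvA_eq_fold,
    pvA3 (PySem.Dict.mk modules) (PySem.Dict.mk modules).keys hknd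
      (PySem.Dict.mk modules).keys PySem.Dict.empty hknd
      (fun m _ => PySem.Dict.contains_empty m) PySem.Dict.nodup_keys_empty]
  simp [pvSpec, PySem.Dict.empty, Function.comp]

-- ----- B side -----

def pvIdx (md : PySem.Dict String (List Int)) (ks : List String) : PySem.Dict Int (List String) :=
  ks.foldl (fun idx name =>
    (PySem.List.dedup (md.getD name [])).foldl (fun idx e =>
      idx.modify e [] (· ++ [name])) idx) PySem.Dict.empty

lemma pvFilter_eq_of_nodup {α : Type} [BEq α] [LawfulBEq α] (l : List α) (e : α) (h : l.Nodup) :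
    l.filter (fun x => x == e) = if e ∈ l then [e] else [] := by
  rw [List.filter_beq]
  by_cases hm : e ∈ l
  · rw [if_pos hm, List.count_eq_one_of_mem h hm]; rfl
  · rw [if_neg hm, List.count_eq_zero_of_not_mem hm]; rfl

lemma pvP_filter (md : PySem.Dict String (List Int)) (e : Int) (ks : List String) :
    ((ks.flatMap (fun n => (PySem.List.dedup (md.getD n [])).map (fun x => (x, n)))).filter
        (fun p => p.1 == e)).map (fun p => p.2)
      = ks.filter (fun n => (PySem.List.dedup (md.getD n [])).contains e) := by
  induction ks with
  | nil => rfl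
  | cons n ks ih =>
    rw [List.flatMap_cons, List.filter_append, List.map_append, ih, List.filter_cons,
      List.filter_map]
    have hcomp : ((fun p : Int × String => p.1 == e) ∘ (fun x : Int => (x, n)))
        = (fun x => x == e) := rfl
    have hnd : (PySem.List.dedup (md.getD n [])).Nodup := PySem.Set.nodup_ofList _
    rw [hcomp, pvFilter_eq_of_nodup _ _ hnd]
    by_cases hm : e ∈ PySem.List.dedup (md.getD n [])
    · have hct : (PySem.List.dedup (md.getD n [])).contains e = true := by simpa using hm
      rw [if_pos hm, if_pos hct]; rfl
    · have hct : (PySem.List.dedup (md.getD n [])).contains e = false := by simpa using hm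
      rw [if_neg hm, hct]; rfl

lemma pvIdx_getD (md : PySem.Dict String (List Int)) (ks : List String) (e : Int) :
    (pvIdx md ks).getD e [] =
      ks.filter (fun n => (PySem.List.dedup (md.getD n [])).contains e) := by
  have h1 : pvIdx md ks
      = (ks.flatMap (fun n => (PySem.List.dedup (md.getD n [])).map (fun x => (x, n)))).foldl
          (fun d p => d.modify p.1 [] (fun x => x ++ [p.2])) PySem.Dict.empty := by
    rw [List.foldl_flatMap]
    simp only [List.foldl_map]
    rfl
  rw [h1, PySem.Dict.getD_foldl_modify_append, pvP_filter]
  simp [PySem.Dict.getD_empty]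

def pvCounts (md : PySem.Dict String (List Int)) (ks : List String) (m1 : String) :
    PySem.Dict String Int :=
  (PySem.List.dedup (md.getD m1 [])).foldl (fun c e =>
    ((pvIdx md ks).getD e []).foldl (fun c m2 => c.insert m2 (c.getD m2 0 + 1)) c)
    PySem.Dict.empty

lemma pvCounts_eq_counter (md : PySem.Dict String (List Int)) (ks : List String) (m1 : String) :
    pvCounts md ks m1 =
      PySem.Dict.counter ((PySem.List.dedup (md.getD m1 [])).flatMap
        (fun e => (pvIdx md ks).getD e [])) := by
  rw [← PySem.Dict.foldl_insert_getD_add_one_eq_counter, List.foldl_flatMap]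
  rfl

lemma pvSum_ite (l : List Int) (p : Int → Bool) :
    (l.map (fun e => if p e then 1 else 0)).sum = l.countP p := by
  induction l with
  | nil => rfl
  | cons a l ih =>
    rw [List.map_cons, List.sum_cons, List.countP_cons, ih]
    split_ifs with h <;> simp [Nat.add_comm]

lemma pvFlat_count (md : PySem.Dict String (List Int)) (ks : List String) (m1 m2 : String)
    (hks : ks.Nodup) (hm2 : m2 ∈ ks) :
    (List.count m2 ((PySem.List.dedup (md.getD m1 [])).flatMap
        (fun e => (pvIdx md ks).getD e [])) : Int) = pvOv md m1 m2 := by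
  have hterm : ∀ e : Int, List.count m2 ((pvIdx md ks).getD e [])
      = if (PySem.List.dedup (md.getD m2 [])).contains e then 1 else 0 := by
    intro e
    rw [pvIdx_getD]
    by_cases hp : (PySem.List.dedup (md.getD m2 [])).contains e = true
    · have hcf := List.count_filter (l := ks)
          (p := fun n => (PySem.List.dedup (md.getD n [])).contains e) (a := m2) hp
      rw [if_pos hp, hcf, List.count_eq_one_of_mem hks hm2]
    · rw [if_neg hp, List.count_eq_zero_of_not_mem]
      intro hx
      exact hp (List.mem_filter.mp hx).2
  rw [List.count_flatMap]
  have hmap : List.map (List.count m2 ∘ fun e => (pvIdx md ks).getD e [])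
        (PySem.List.dedup (md.getD m1 []))
      = List.map (fun e => if (PySem.List.dedup (md.getD m2 [])).contains e then 1 else 0)
        (PySem.List.dedup (md.getD m1 [])) := by
    apply List.map_congr_left
    intro e _
    exact hterm e
  rw [hmap, pvSum_ite]
  unfold pvOv
  rw [PySem.Set.inter, ← List.countP_eq_length_filter]
  rfl

lemma pvCounts_getD (md : PySem.Dict String (List Int)) (ks : List String) (m1 m2 : String)
    (hks : ks.Nodup) (hm2 : m2 ∈ ks) :
    (pvCounts md ks m1).getD m2 0 = pvOv md m1 m2 := by
  rw [pvCounts_eq_counter, PySem.Dict.getD_counter, pvFlat_count md ks m1 m2 hks hm2]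

lemma pvCounts_contains (md : PySem.Dict String (List Int)) (ks : List String) (m1 m2 : String)
    (hks : ks.Nodup) (hm2 : m2 ∈ ks) :
    (pvCounts md ks m1).contains m2 = decide (0 < pvOv md m1 m2) := by
  rw [pvCounts_eq_counter, PySem.Dict.contains_counter]
  have h := pvFlat_count md ks m1 m2 hks hm2
  by_cases hm : m2 ∈ ((PySem.List.dedup (md.getD m1 [])).flatMap
      (fun e => (pvIdx md ks).getD e []))
  · have h1 : 0 < pvOv md m1 m2 := by
      rw [← h]
      exact_mod_cast List.count_pos_iff.mpr hm
    rw [List.contains_eq_mem, decide_eq_true hm, decide_eq_true h1]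
  · have h1 : ¬ 0 < pvOv md m1 m2 := by
      rw [← h, List.count_eq_zero.mpr hm]
      simp
    rw [List.contains_eq_mem, decide_eq_false hm, decide_eq_false h1]

def pvInnerB (md : PySem.Dict String (List Int)) (ks : List String) (m1 : String) :
    List (String × Int) :=
  ks.foldl (fun inner m2 =>
    if m2 != m1 && (pvCounts md ks m1).contains m2
    then inner ++ [(m2, (pvCounts md ks m1).getD m2 0)] else inner) []

def pvOuterB (md : PySem.Dict String (List Int)) (ks : List String) :
    List (String × List (String × Int)) :=
  ks.foldl (fun out m1 =>
    if !(pvInnerB md ks m1).isEmpty then out ++ [(m1, pvInnerB md ks m1)] else out) []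

lemma pvB_eq_fold (modules : List (String × List Int)) :
    construct_module_hierarchy_py_alt modules =
      pvOuterB (PySem.Dict.mk modules) (PySem.Dict.mk modules).keys := rfl

lemma pvInnerB_eq (md : PySem.Dict String (List Int)) (ks : List String) (hks : ks.Nodup) :
    ∀ m1, pvInnerB md ks m1 = pvInner md ks m1 := by
  intro m1
  unfold pvInnerB
  rw [PySem.List.foldl_append_if (p := fun m2 => m2 != m1 && (pvCounts md ks m1).contains m2)
    (f := fun m2 => (m2, (pvCounts md ks m1).getD m2 0)), List.nil_append]
  have hf : ks.filter (fun m2 => m2 != m1 && (pvCounts md ks m1).contains m2)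
      = ks.filter (fun m2 => decide (m1 ≠ m2) && decide (0 < pvOv md m1 m2)) := by
    apply List.filter_congr
    intro m2 hm2
    rw [pvCounts_contains md ks m1 m2 hks hm2]
    congr 1
    by_cases hq : m2 = m1
    · subst hq; simp
    · rw [bne_iff_ne.mpr hq, decide_eq_true (show m1 ≠ m2 from fun hh => hq hh.symm)]
  rw [hf]
  apply List.map_congr_left
  intro m2 hm2
  rw [pvCounts_getD md ks m1 m2 hks (List.mem_of_mem_filter hm2)]

lemma pvB_spec (modules : List (String × List Int))
    (hnd : (modules.map Prod.fst).Nodup) :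
    construct_module_hierarchy_py_alt modules =
      pvSpec (PySem.Dict.mk modules) (PySem.Dict.mk modules).keys := by
  have hks : (PySem.Dict.mk modules).keys.Nodup := hnd
  rw [pvB_eq_fold]
  unfold pvOuterB pvSpec
  simp only [pvInnerB_eq _ _ hks]
  rw [PySem.List.foldl_append_if
    (p := fun m1 => !(pvInner (PySem.Dict.mk modules) (PySem.Dict.mk modules).keys m1).isEmpty)
    (f := fun m1 => (m1, pvInner (PySem.Dict.mk modules) (PySem.Dict.mk modules).keys m1)),
    List.nil_append]

-- ===== VERDICT (by name: the statement is the Claim_ definition above) =====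
theorem construct_module_hierarchy_py_spec : Claim_equal_construct_module_hierarchy_py := by
  intro modules _ hpre
  unfold Spec_construct_module_hierarchy_py
  rw [pvA_spec modules hpre, pvB_spec modules hpre]
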